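-- pv_equiv track=rewrite | github.com/Ayobamiu/text-extract-with-paddle-ocr | utils/table_converter.py | _grid_to_markdown
-- ===== SOURCE A (Python) =====
-- from typing import List, Tuple, Optional
--
-- def _grid_to_markdown(grid: List[List[Optional[str]]]) -> str:
--     """
--     Convert table grid to markdown format.
--
--     Args:
--         grid: 2D list of cell contents
--
--     Returns:
--         Markdown formatted table string
--     """
--     if not grid or not grid[0]:
--         return ""
--
--     # Determine column widths
--     num_cols = len(grid[0])
--     col_widths = [0] * num_cols
--
--     for row in grid:
--         for col_idx in range(num_cols):
--             if col_idx < len(row):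
--                 cell_content = row[col_idx] or ""
--                 col_widths[col_idx] = max(col_widths[col_idx], len(cell_content))
--
--     # Ensure minimum width of 3 for markdown separator
--     col_widths = [max(width, 3) for width in col_widths]
--
--     # Build markdown rows
--     lines = []
--
--     for row_idx, row in enumerate(grid):
--         # Build row with proper padding
--         cells = []
--         for col_idx in range(num_cols):
--             if col_idx < len(row):
--                 content = row[col_idx] or ""
--             else:
--                 content = ""
--
--             # Pad content to column width
--             padded = content[: col_widths[col_idx]].ljust(col_widths[col_idx])
--             cells.append(padded)
--
--         # Join with pipes
--         line = "| " + " | ".join(cells) + " |"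
--         lines.append(line)
--
--         # Add separator after first row
--         if row_idx == 0:
--             separator = "|" + "|".join(["-" * (w + 2) for w in col_widths]) + "|"
--             lines.append(separator)
--
--     return "\n".join(lines)
-- ===== SOURCE B (Python) =====
-- from typing import List, Optional
--
--
-- def _grid_to_markdown(grid: List[List[Optional[str]]]) -> str:
--     """Build the markdown table column by column: each column's width is
--     computed and consumed immediately while its padded slice is appended to
--     the header/separator/body line accumulators (no width array, no
--     row-major rendering pass)."""
--     if not grid or not grid[0]:
--         return ""
--     head, sep = "|", "|"
--     body = ["|"] * (len(grid) - 1)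
--     for c in range(len(grid[0])):
--         col = [(row[c] if c < len(row) else None) or "" for row in grid]
--         w = max(3, max(map(len, col)))
--         head += " " + col[0].ljust(w) + " |"
--         sep += "-" * (w + 2) + "|"
--         body = [b + " " + cell.ljust(w) + " |" for b, cell in zip(body, col[1:])]
--     return "\n".join([head, sep] + body)
-- ===== Notes on version B (the rewrite author's own statement) =====
-- stated objective: alternative
-- what changed: Replaces A's two row-major passes (a width array built by a bound-checked scan, then rendering each row cell by cell with the separator emitted inside the row loop) with a column-major streaming build: a single fold over column indices that extracts each column, computes its width on the spot, and appends that column's padded slice to header/separator/body line accumulators, so no width array and no row-major rendering pass exist.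
import Mathlib
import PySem

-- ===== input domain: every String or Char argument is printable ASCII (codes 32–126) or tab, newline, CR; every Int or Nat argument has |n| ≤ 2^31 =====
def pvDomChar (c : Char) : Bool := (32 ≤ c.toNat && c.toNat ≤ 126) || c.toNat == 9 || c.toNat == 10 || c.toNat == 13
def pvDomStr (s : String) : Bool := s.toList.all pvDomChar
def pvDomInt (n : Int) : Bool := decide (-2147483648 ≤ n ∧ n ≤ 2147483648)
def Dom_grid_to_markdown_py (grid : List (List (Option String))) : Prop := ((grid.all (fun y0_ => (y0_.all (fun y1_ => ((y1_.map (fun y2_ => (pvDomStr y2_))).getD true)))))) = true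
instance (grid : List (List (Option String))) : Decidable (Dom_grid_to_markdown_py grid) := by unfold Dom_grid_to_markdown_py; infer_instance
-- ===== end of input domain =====

-- B builds the table column by column (per-column width computed and consumed on the spot,
-- appended to header/separator/body accumulators) instead of A's width array + row-major render.

-- ===== PORT A =====
-- literal port of _grid_to_markdown (Source A); strings are handled as List Char, the
-- result is re-packed with String.ofList at the end
def grid_to_markdown_py : List (List (Option String)) → String
  | [] => ""                                   -- 'if not grid'
  | row0 :: rest =>
    if row0 = [] then ""                       -- 'or not grid[0]'
    else
      let grid := row0 :: rest
      let numCols := row0.length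
      -- width scan: 'for row in grid: for col_idx in range(num_cols): …'
      let colWidths0 : List Nat :=
        grid.foldl (fun ws row =>
          (List.range numCols).foldl (fun ws c =>
            if c < row.length then
              -- row[col_idx] is in range by the guard; 'x or ""' = Option.getD ""
              ws.set c (max (ws.getD c 0) ((row.getD c none).getD "").toList.length)
            else ws) ws)
          (List.replicate numCols 0)
      let colWidths := colWidths0.map (fun w => max w 3)
      -- 'for row_idx, row in enumerate(grid): …'
      let lines : List (List Char) :=
        (PySem.List.enumerate grid 0).foldl (fun lines rc =>
          let row := rc.2
          -- 'for col_idx in range(num_cols): cells.append(padded)'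
          let cells : List (List Char) := (List.range numCols).map (fun c =>
            let content : List Char :=
              if c < row.length then ((row.getD c none).getD "").toList else []
            let w := colWidths.getD c 0
            -- content[: w].ljust(w)
            (content.take w) ++ List.replicate (w - (content.take w).length) ' ')
          let line := ['|', ' '] ++ PySem.Chars.join [' ', '|', ' '] cells ++ [' ', '|']
          let lines := lines ++ [line]
          if rc.1 = 0 then
            lines ++ [['|'] ++ PySem.Chars.join ['|']
              (colWidths.map (fun w => List.replicate (w + 2) '-')) ++ ['|']]
          else lines) []
      String.ofList (PySem.Chars.join ['\n'] lines)

-- ===== PORT B =====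
-- literal port of Source B: fold over the column indices carrying (head, sep, body);
-- each step maps the column out of the grid, takes its width, and appends the
-- padded slice to every accumulator ('cell.ljust(w)' = cell ++ replicate (w - len) ' ';
-- 'zip(body, col[1:])' = List.zip; the final '"\n".join([head, sep] + body)')
def grid_to_markdown_py_alt : List (List (Option String)) → String
  | [] => ""
  | row0 :: rest =>
    if row0 = [] then ""
    else
      let g := row0 :: rest
      let st := (List.range row0.length).foldl (fun st c =>
        let col : List (List Char) := g.map (fun row => ((row.getD c none).getD "").toList)
        let w := max 3 ((col.map List.length).foldl max 0)
        (st.1 ++ [' '] ++ (col.headD [] ++ List.replicate (w - (col.headD []).length) ' ') ++ [' ', '|'],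
         st.2.1 ++ List.replicate (w + 2) '-' ++ ['|'],
         (st.2.2.zip (col.drop 1)).map (fun p =>
           p.1 ++ [' '] ++ (p.2 ++ List.replicate (w - p.2.length) ' ') ++ [' ', '|'])))
        ((['|'], ['|'], List.replicate rest.length ['|']) :
          List Char × List Char × List (List Char))
      String.ofList (PySem.Chars.join ['\n'] (st.1 :: st.2.1 :: st.2.2))

-- ===== PRECONDITION & SPEC =====
def Spec_grid_to_markdown_py (grid : List (List (Option String))) (out : String) : Prop := out = grid_to_markdown_py_alt grid
instance (grid : List (List (Option String))) (out : String) : Decidable (Spec_grid_to_markdown_py grid out) := by unfold Spec_grid_to_markdown_py; infer_instance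

-- ===== CLAIM (what is proved, stated in full; the proofs are below) =====
def Claim_equal_grid_to_markdown_py : Prop := ∀ (grid : List (List (Option String))), Dom_grid_to_markdown_py grid → Spec_grid_to_markdown_py grid (grid_to_markdown_py grid)

-- ===== LEMMAS AND PROOFS =====

-- the normalized cell at column c (Python's '(row[c] if c < len(row) else None) or ""')
def cellC (row : List (Option String)) (c : Nat) : List Char :=
  ((row.getD c none).getD "").toList

-- A's bound-checked width-update step for one row
def stepW (row : List (Option String)) (ws : List Nat) (c : Nat) : List Nat :=
  if c < row.length then ws.set c (max (ws.getD c 0) (cellC row c).length) else ws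

-- the common column width: max 3 (running max of normalized cell lengths)
def wfun (grid : List (List (Option String))) (c : Nat) : Nat :=
  max 3 (grid.foldl (fun a row => max a (cellC row c).length) 0)

def padC (cs : List Char) (w : Nat) : List Char := cs ++ List.replicate (w - cs.length) ' '

def lineR (grid : List (List (Option String))) (n : Nat) (row : List (Option String)) : List Char :=
  ['|', ' '] ++ PySem.Chars.join [' ', '|', ' ']
    ((List.range n).map (fun c => padC (cellC row c) (wfun grid c))) ++ [' ', '|']

def sepR (grid : List (List (Option String))) (n : Nat) : List Char :=
  ['|'] ++ PySem.Chars.join ['|'] ((List.range n).map (fun c => List.replicate (wfun grid c + 2) '-')) ++ ['|']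

-- out-of-range normalized cell is empty
theorem cellC_of_le (row : List (Option String)) (c : Nat) (h : row.length ≤ c) :
    cellC row c = [] := by
  simp [cellC, List.getD_eq_getElem?_getD, List.getElem?_eq_none h]

theorem cellC_if (row : List (Option String)) (c : Nat) :
    (if c < row.length then ((row.getD c none).getD "").toList else []) = cellC row c := by
  split
  · rfl
  · rw [cellC_of_le row c (by omega)]

theorem stepW_length (row : List (Option String)) (ws : List Nat) (c : Nat) :
    (stepW row ws c).length = ws.length := by
  unfold stepW; split <;> simp

theorem foldl_stepW_length (row : List (Option String)) (m : Nat) (ws : List Nat) :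
    ((List.range m).foldl (stepW row) ws).length = ws.length := by
  induction m generalizing ws with
  | zero => rfl
  | succ m ih =>
    rw [List.range_succ, List.foldl_append, List.foldl_cons, List.foldl_nil, stepW_length, ih]

theorem getD_stepW (row : List (Option String)) (ws : List Nat) (c i : Nat)
    (hi : i < ws.length) :
    (stepW row ws i).getD c 0 =
      if c = i then max (ws.getD c 0) (cellC row c).length else ws.getD c 0 := by
  unfold stepW
  by_cases hc : c = i
  · subst hc
    split
    · simp [List.getD_eq_getElem?_getD, hi]
    · rw [cellC_of_le row c (by omega)]
      simp
  · split <;> simp [List.getD_eq_getElem?_getD, List.getElem?_set_ne (by omega : i ≠ c)]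

theorem getD_foldl_stepW (row : List (Option String)) (m : Nat) :
    ∀ ws : List Nat, m ≤ ws.length → ∀ c,
      ((List.range m).foldl (stepW row) ws).getD c 0 =
        if c < m then max (ws.getD c 0) (cellC row c).length else ws.getD c 0 := by
  induction m with
  | zero => intro ws _ c; simp
  | succ m ih =>
    intro ws hm c
    rw [List.range_succ, List.foldl_append, List.foldl_cons, List.foldl_nil]
    rw [getD_stepW row _ c m (by rw [foldl_stepW_length]; omega)]
    rw [ih ws (by omega) c]
    by_cases hc : c = m
    · subst hc; simp
    · by_cases hlt : c < m
      · simp [hc, hlt, Nat.lt_succ_of_lt hlt]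
      · have : ¬ c < m + 1 := by omega
        simp [hc, hlt, this]

-- the outer width fold, pointwise
theorem getD_widthFold (g : List (List (Option String))) (n : Nat) :
    ∀ ws : List Nat, ws.length = n →
      ((g.foldl (fun ws row => (List.range n).foldl (stepW row) ws) ws).length = n ∧
       ∀ c, c < n →
        (g.foldl (fun ws row => (List.range n).foldl (stepW row) ws) ws).getD c 0 =
          g.foldl (fun a row => max a (cellC row c).length) (ws.getD c 0)) := by
  induction g with
  | nil => intro ws hws; exact ⟨hws, fun c _ => rfl⟩
  | cons row rows ih =>
    intro ws hws
    have hlen : ((List.range n).foldl (stepW row) ws).length = n := by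
      rw [foldl_stepW_length]; exact hws
    obtain ⟨h1, h2⟩ := ih _ hlen
    refine ⟨h1, fun c hc => ?_⟩
    rw [List.foldl_cons, List.foldl_cons, h2 c hc,
        getD_foldl_stepW row n ws (by omega) c, if_pos hc]

-- the width list A computes is the canonical one
theorem widthsA_eq (g : List (List (Option String))) (n : Nat) :
    (g.foldl (fun ws row => (List.range n).foldl (stepW row) ws) (List.replicate n 0)).map
        (fun w => max w 3) =
      (List.range n).map (wfun g) := by
  obtain ⟨h1, h2⟩ := getD_widthFold g n (List.replicate n 0) (by simp)
  apply List.ext_getElem (by simp [h1])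
  intro i hi1 hi2
  simp only [List.length_map, h1] at hi1
  have hthis := h2 i hi1
  have h3 : (List.replicate n (0 : Nat)).getD i 0 = 0 := by
    simp [List.getD_eq_getElem?_getD, hi1]
  rw [h3] at hthis
  simp only [List.getElem_map, List.getElem_range, wfun]
  rw [List.getElem_eq_getD 0, hthis, Nat.max_comm]

-- every normalized cell fits in its column width
theorem cellC_le_wfun (g : List (List (Option String))) (row : List (Option String))
    (hrow : row ∈ g) (c : Nat) : (cellC row c).length ≤ wfun g c :=
  le_trans ((PySem.List.le_foldl_max_nat g (fun row => (cellC row c).length) 0).2 row hrow)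
    (le_max_right 3 _)

-- A's padded cell (truncate-then-ljust) at a fitting width is just padC
theorem padA_eq (cs : List Char) (w : Nat) (h : cs.length ≤ w) :
    (cs.take w) ++ List.replicate (w - (cs.take w).length) ' ' = padC cs w := by
  rw [List.take_of_length_le h]; rfl

-- ===== canonical form of PORT A =====
theorem portA_canon (row0 : List (Option String)) (rest : List (List (Option String)))
    (h0 : row0 ≠ []) :
    grid_to_markdown_py (row0 :: rest) =
      String.ofList (PySem.Chars.join ['\n']
        (lineR (row0 :: rest) row0.length row0 :: sepR (row0 :: rest) row0.length ::
          rest.map (lineR (row0 :: rest) row0.length))) := by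
  simp only [grid_to_markdown_py]
  rw [if_neg h0]
  set g := row0 :: rest with hg
  set n := row0.length with hn
  have hstep : ∀ (row : List (Option String)) (ws : List Nat),
      (List.range n).foldl (fun ws c =>
        if c < row.length then
          ws.set c (max (ws.getD c 0) ((row.getD c none).getD "").toList.length)
        else ws) ws = (List.range n).foldl (stepW row) ws := by
    intro row ws; rfl
  simp only [hstep]
  have hw := widthsA_eq g n
  rw [hw]
  have hwget : ∀ c, c < n → ((List.range n).map (wfun g)).getD c 0 = wfun g c := by
    intro c hc; exact PySem.List.getD_map_range (wfun g) n c 0 hc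
  have hline : ∀ row ∈ g,
      (['|', ' '] ++ PySem.Chars.join [' ', '|', ' ']
        ((List.range n).map (fun c =>
          let content : List Char :=
            if c < row.length then ((row.getD c none).getD "").toList else []
          let w := ((List.range n).map (wfun g)).getD c 0
          (content.take w) ++ List.replicate (w - (content.take w).length) ' ')) ++ [' ', '|'])
      = lineR g n row := by
    intro row hrow
    unfold lineR
    congr 2
    congr 1
    apply List.map_congr_left
    intro c hc
    rw [List.mem_range] at hc
    simp only [cellC_if, hwget c hc]
    exact padA_eq _ _ (cellC_le_wfun g row hrow c)
  have hsep : (['|'] ++ PySem.Chars.join ['|']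
      (((List.range n).map (wfun g)).map (fun w => List.replicate (w + 2) '-')) ++ ['|'])
      = sepR g n := by
    unfold sepR; rw [List.map_map]; rfl
  rw [hg, PySem.List.enumerate_cons, List.foldl_cons]
  simp only [reduceIte, List.nil_append]
  rw [PySem.List.foldl_congr_mem (PySem.List.enumerate rest (0 + 1))
    _ (fun lines rc => lines ++ [lineR g n rc.2]) _ (by
      intro acc rc hrc
      rw [PySem.List.mem_enumerate_iff] at hrc
      obtain ⟨k, hk, rfl⟩ := hrc
      have : (0 : Int) + 1 + k ≠ 0 := by omega
      simp only [if_neg this]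
      congr 1
      · congr 1
        exact hline rest[k] (by rw [hg]; exact List.mem_cons_of_mem _ (List.getElem_mem hk)))
    ]
  rw [PySem.List.foldl_append_singleton_eq_map (fun rc : Int × List (Option String) => lineR g n rc.2)]
  have hmaps : (PySem.List.enumerate rest (0 + 1)).map (fun rc => lineR g n rc.2)
      = rest.map (lineR g n) := by
    have : (fun rc : Int × List (Option String) => lineR g n rc.2)
        = (lineR g n) ∘ (fun rc : Int × List (Option String) => rc.2) := rfl
    rw [this, ← List.map_map, PySem.List.map_snd_enumerate]
  rw [hmaps]
  congr 1
  congr 1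
  rw [hline row0 (by rw [hg]; exact List.mem_cons_self), hsep]
  rfl

-- ===== B-side lemmas =====

-- a data-row segment and the separator segment contributed by column c
def hsegC (g : List (List (Option String))) (row : List (Option String)) (c : Nat) : List Char :=
  [' '] ++ padC (cellC row c) (wfun g c) ++ [' ', '|']

def ssegC (g : List (List (Option String))) (c : Nat) : List Char :=
  List.replicate (wfun g c + 2) '-' ++ ['|']

-- B's per-column width equals the canonical one
theorem wB_eq (g : List (List (Option String))) (c : Nat) :
    max 3 (((g.map (fun row => ((row.getD c none).getD "").toList)).map List.length).foldl max 0)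
      = wfun g c := by
  unfold wfun
  congr 1
  rw [List.map_map, List.foldl_map]
  rfl

-- invariant of B's column fold
theorem foldB_inv (row0 : List (Option String)) (rest : List (List (Option String))) (m : Nat) :
    (List.range m).foldl (fun st c =>
        let col : List (List Char) :=
          (row0 :: rest).map (fun row => ((row.getD c none).getD "").toList)
        let w := max 3 ((col.map List.length).foldl max 0)
        (st.1 ++ [' '] ++ (col.headD [] ++ List.replicate (w - (col.headD []).length) ' ') ++ [' ', '|'],
         st.2.1 ++ List.replicate (w + 2) '-' ++ ['|'],
         (st.2.2.zip (col.drop 1)).map (fun p =>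
           p.1 ++ [' '] ++ (p.2 ++ List.replicate (w - p.2.length) ' ') ++ [' ', '|'])))
      ((['|'], ['|'], List.replicate rest.length ['|']) :
        List Char × List Char × List (List Char))
    = (['|'] ++ ((List.range m).map (hsegC (row0 :: rest) row0)).flatten,
       ['|'] ++ ((List.range m).map (ssegC (row0 :: rest))).flatten,
       rest.map (fun row => ['|'] ++ ((List.range m).map (hsegC (row0 :: rest) row)).flatten)) := by
  induction m with
  | zero => simp [List.map_const']
  | succ m ih =>
    rw [List.range_succ, List.foldl_append, List.foldl_cons, List.foldl_nil, ih]
    simp only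
    rw [wB_eq (row0 :: rest) m]
    have hhead : ((row0 :: rest).map
        (fun row => ((row.getD m none).getD "").toList)).headD [] = cellC row0 m := rfl
    have hdrop : ((row0 :: rest).map
        (fun row => ((row.getD m none).getD "").toList)).drop 1
        = rest.map (fun row => cellC row m) := rfl
    rw [hhead, hdrop]
    refine congrArg₂ _ ?_ (congrArg₂ _ ?_ ?_)
    · simp [List.map_append, List.flatten_append, hsegC, padC, List.append_assoc]
    · simp [List.map_append, List.flatten_append, ssegC, List.append_assoc]
    · rw [List.zip_map', List.map_map]
      apply List.map_congr_left
      intro row _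
      simp [List.map_append, List.flatten_append, hsegC, padC, List.append_assoc]

-- flattened ' cell |' segments are the ' | '-joined cells (nonempty list, cons form)
theorem lineFlat : ∀ (a : List Char) (t : List (List Char)),
    ((a :: t).map (fun x => [' '] ++ x ++ [' ', '|'])).flatten
      = [' '] ++ PySem.Chars.join [' ', '|', ' '] (a :: t) ++ [' ', '|'] := by
  intro a t
  induction t generalizing a with
  | nil => simp [PySem.Chars.join_singleton]
  | cons b t ih =>
    rw [PySem.Chars.join_cons_cons]
    simp only [List.map_cons, List.flatten_cons] at ih ⊢
    rw [ih b]
    simp [List.append_assoc]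

-- flattened separator segments are the '|'-joined chunks (nonempty list, cons form)
theorem sepFlat : ∀ (a : List Char) (t : List (List Char)),
    ((a :: t).map (fun x => x ++ ['|'])).flatten
      = PySem.Chars.join ['|'] (a :: t) ++ ['|'] := by
  intro a t
  induction t generalizing a with
  | nil => simp [PySem.Chars.join_singleton]
  | cons b t ih =>
    rw [PySem.Chars.join_cons_cons]
    simp only [List.map_cons, List.flatten_cons] at ih ⊢
    rw [ih b]
    simp [List.append_assoc]

-- B's accumulated data line is the canonical rendered line
theorem lineB_eq (g : List (List (Option String))) (n : Nat) (hn : n ≠ 0)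
    (row : List (Option String)) :
    ['|'] ++ ((List.range n).map (hsegC g row)).flatten = lineR g n row := by
  have hmm : (List.range n).map (hsegC g row)
      = ((List.range n).map (fun c => padC (cellC row c) (wfun g c))).map
          (fun x => [' '] ++ x ++ [' ', '|']) := by
    rw [List.map_map]; rfl
  have hne : (List.range n).map (fun c => padC (cellC row c) (wfun g c)) ≠ [] := by
    simp [List.range_eq_nil, hn]
  obtain ⟨a, t, hat⟩ := List.exists_cons_of_ne_nil hne
  rw [hmm, hat, lineFlat]
  unfold lineR
  rw [hat]
  rfl

-- B's accumulated separator line is the canonical separator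
theorem sepB_eq (g : List (List (Option String))) (n : Nat) (hn : n ≠ 0) :
    ['|'] ++ ((List.range n).map (ssegC g)).flatten = sepR g n := by
  have hmm : (List.range n).map (ssegC g)
      = ((List.range n).map (fun c => List.replicate (wfun g c + 2) '-')).map
          (fun x => x ++ ['|']) := by
    rw [List.map_map]; rfl
  have hne : (List.range n).map (fun c => List.replicate (wfun g c + 2) '-') ≠ [] := by
    simp [List.range_eq_nil, hn]
  obtain ⟨a, t, hat⟩ := List.exists_cons_of_ne_nil hne
  rw [hmm, hat, sepFlat]
  unfold sepR
  rw [hat]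
  rfl

-- ===== canonical form of PORT B =====
theorem portB_canon (row0 : List (Option String)) (rest : List (List (Option String)))
    (h0 : row0 ≠ []) :
    grid_to_markdown_py_alt (row0 :: rest) =
      String.ofList (PySem.Chars.join ['\n']
        (lineR (row0 :: rest) row0.length row0 :: sepR (row0 :: rest) row0.length ::
          rest.map (lineR (row0 :: rest) row0.length))) := by
  have hn : row0.length ≠ 0 := by simpa [List.length_eq_zero_iff] using h0
  simp only [grid_to_markdown_py_alt]
  rw [if_neg h0, foldB_inv row0 rest row0.length]
  congr 1
  congr 1
  rw [lineB_eq _ _ hn, sepB_eq _ _ hn]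
  congr 1
  congr 1
  apply List.map_congr_left
  intro row _
  exact lineB_eq _ _ hn row

-- ===== VERDICT (by name: the statement is the Claim_ definition above) =====
theorem grid_to_markdown_py_spec : Claim_equal_grid_to_markdown_py := by
  intro grid _
  unfold Spec_grid_to_markdown_py
  match grid with
  | [] => rfl
  | row0 :: rest =>
    by_cases h0 : row0 = []
    · subst h0; rfl
    · rw [portA_canon row0 rest h0, portB_canon row0 rest h0]
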